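-- pv_equiv track=rewrite | github.com/capston-qrcode/qrcode-python | qrcode/util.py | add_terminator_and_pad
-- ===== SOURCE A (Python) =====
-- def add_terminator_and_pad(encoded_data, total_bits):
--     '''
--     인코드 데이터에 종단자/패딩 비트 추가하는 함수
--     :param encoded_data: 인코드 데이터
--     :param total_bits: qr코드의 총 비트 수
--     :return: 종단자/패딩 비트가 추가된 인코드 데이터
--     '''
--
--     # 남은 비트 수가 4개 이하면 남은 수 만큼 0 추가
--     for _ in range(min(4, total_bits - len(encoded_data))):
--         encoded_data += '0'
--
--     # 8 비트 단위로 끊을 수 있도록 0 비트 추가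
--     while len(encoded_data) % 8 != 0:
--         encoded_data += '0'
--
--     # 두 패딩 비트를 번갈아 가며 총 비트 수에 맞게 추가
--     padding_patterns = ['11101100', '00010001']
--     bytes_to_fill = (total_bits - len(encoded_data)) // 8
--     for i in range(bytes_to_fill):
--         encoded_data += padding_patterns[i % 2]
--     return encoded_data
-- ===== SOURCE B (Python) =====
-- def add_terminator_and_pad(encoded_data, total_bits):
--     """Closed-form: compute terminator and byte-alignment pad lengths arithmetically,
--     then build the alternating padding bytes by string repetition and slicing."""
--     L = len(encoded_data)
--     term = max(0, min(4, total_bits - L))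
--     align = (8 - (L + term) % 8) % 8
--     bytes_to_fill = max(0, (total_bits - (L + term + align)) // 8)
--     pad = ('1110110000010001' * ((bytes_to_fill + 1) // 2))[:bytes_to_fill * 8]
--     return encoded_data + '0' * (term + align) + pad
-- ===== Notes on version B (the rewrite author's own statement) =====
-- stated objective: simpler
-- what changed: Replaced A's three incremental append loops (terminator loop, byte-align while loop, alternating padding-byte loop) by closed-form length arithmetic plus one string repetition and slice.
import Mathlib
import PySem

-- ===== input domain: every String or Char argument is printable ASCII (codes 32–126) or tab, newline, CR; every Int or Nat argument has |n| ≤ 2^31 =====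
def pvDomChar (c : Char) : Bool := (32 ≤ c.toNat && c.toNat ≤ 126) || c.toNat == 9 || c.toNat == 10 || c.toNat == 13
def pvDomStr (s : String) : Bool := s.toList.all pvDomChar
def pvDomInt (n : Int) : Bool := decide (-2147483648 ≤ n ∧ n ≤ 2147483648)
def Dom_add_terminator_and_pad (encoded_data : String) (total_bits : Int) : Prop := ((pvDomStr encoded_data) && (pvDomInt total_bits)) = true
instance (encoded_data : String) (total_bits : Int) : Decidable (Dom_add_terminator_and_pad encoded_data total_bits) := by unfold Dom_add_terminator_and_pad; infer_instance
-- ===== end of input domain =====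

-- B replaces A's three append-one-piece-at-a-time loops by closed-form length arithmetic
-- plus string repetition/slicing (objective: simpler; return value only — no observable mutation).

-- ===== PORT A =====
-- the while-loop "while len(encoded_data) % 8 != 0: encoded_data += '0'", transliterated as recursion
def padTo8 (s : List Char) : List Char :=
  if s.length % 8 ≠ 0 then padTo8 (s ++ ['0']) else s
termination_by (8 - s.length % 8) % 8
decreasing_by simp only [List.length_append, List.length_singleton]; omega

def add_terminator_and_pad (encoded_data : String) (total_bits : Int) : String :=
  let d0 := encoded_data.toList
  let d1 := (PySem.List.pyRange 0 (min 4 (total_bits - PySem.Str.len encoded_data)) 1).foldl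
              (fun s _ => s ++ ['0']) d0
  let d2 := padTo8 d1
  let padding_patterns : List (List Char) :=
    [['1','1','1','0','1','1','0','0'], ['0','0','0','1','0','0','0','1']]
  let bytes_to_fill := PySem.Int.floordiv (total_bits - (d2.length : Int)) 8
  let d3 := (PySem.List.pyRange 0 bytes_to_fill 1).foldl
              (fun s i => s ++ PySem.List.pyGetD padding_patterns (PySem.Int.mod i 2) []) d2
  String.ofList d3

-- ===== PORT B =====
def add_terminator_and_pad_alt (encoded_data : String) (total_bits : Int) : String :=
  let L : Int := PySem.Str.len encoded_data
  let term := max 0 (min 4 (total_bits - L))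
  let align := PySem.Int.mod (8 - PySem.Int.mod (L + term) 8) 8
  let bytes_to_fill := max 0 (PySem.Int.floordiv (total_bits - (L + term + align)) 8)
  let pattern16 : List Char :=
    ['1','1','1','0','1','1','0','0','0','0','0','1','0','0','0','1']
  let pad := ((List.replicate (PySem.Int.floordiv (bytes_to_fill + 1) 2).toNat pattern16).flatten).take
               (bytes_to_fill * 8).toNat
  String.ofList (encoded_data.toList ++ List.replicate (term + align).toNat '0' ++ pad)

-- ===== PRECONDITION & SPEC =====
def Spec_add_terminator_and_pad (encoded_data : String) (total_bits : Int) (out : String) : Prop := out = add_terminator_and_pad_alt encoded_data total_bits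
instance (encoded_data : String) (total_bits : Int) (out : String) : Decidable (Spec_add_terminator_and_pad encoded_data total_bits out) := by unfold Spec_add_terminator_and_pad; infer_instance

-- ===== CLAIM (what is proved, stated in full; the proofs are below) =====
def Claim_equal_add_terminator_and_pad : Prop := ∀ (encoded_data : String) (total_bits : Int), Dom_add_terminator_and_pad encoded_data total_bits → Spec_add_terminator_and_pad encoded_data total_bits (add_terminator_and_pad encoded_data total_bits)

-- ===== LEMMAS AND PROOFS =====

-- the two one-byte patterns and the alternating byte sequence, shared shape of both proofs
def pvP0 : List Char := ['1','1','1','0','1','1','0','0']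
def pvP1 : List Char := ['0','0','0','1','0','0','0','1']
def pvG (i : Nat) : List Char := if i % 2 = 0 then pvP0 else pvP1
def pvAlt (m : Nat) : List Char := (List.range m).flatMap pvG

lemma pyRange_zero_toNat (m : Int) :
    PySem.List.pyRange 0 m 1 = List.map (fun k : Nat => (k : Int)) (List.range m.toNat) := by
  by_cases h : m ≤ 0
  · have h0 : m.toNat = 0 := Int.toNat_of_nonpos h
    rw [h0]
    simp [PySem.List.pyRange]
    omega
  · have : m = (m.toNat : Int) := (Int.toNat_of_nonneg (by omega)).symm
    rw [this]
    exact PySem.List.pyRange_zero_natCast m.toNat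

lemma zeros_foldl (l : List Int) (s : List Char) :
    l.foldl (fun s _ => s ++ ['0']) s = s ++ List.replicate l.length '0' := by
  induction l generalizing s with
  | nil => simp
  | cons a t ih => simp [List.foldl_cons, ih, List.replicate_succ]

lemma padTo8_eq (k : Nat) : ∀ (s : List Char), (8 - s.length % 8) % 8 = k →
    padTo8 s = s ++ List.replicate k '0' := by
  induction k with
  | zero =>
    intro s h
    have h0 : s.length % 8 = 0 := by omega
    rw [padTo8]
    simp [h0]
  | succ k ih =>
    intro s h
    have hr : s.length % 8 ≠ 0 := by omega
    rw [padTo8, if_pos hr]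
    have hm : (8 - (s ++ ['0']).length % 8) % 8 = k := by
      simp only [List.length_append, List.length_singleton]; omega
    rw [ih _ hm, List.append_assoc, List.replicate_succ]
    rfl

lemma flatten_replicate_alt (q : Nat) :
    (List.replicate q (pvP0 ++ pvP1)).flatten = pvAlt (2 * q) := by
  induction q with
  | zero => simp [pvAlt]
  | succ q ih =>
    rw [List.replicate_succ', List.flatten_append, ih]
    have h2 : 2 * (q + 1) = (2 * q + 1) + 1 := by ring
    rw [h2]
    simp only [pvAlt, List.range_succ, List.flatMap_append, List.flatMap_cons, List.flatMap_nil]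
    have g0 : pvG (2 * q) = pvP0 := by simp [pvG, Nat.mul_mod_right]
    have g1 : pvG (2 * q + 1) = pvP1 := by
      simp [pvG, Nat.add_mod, Nat.mul_mod_right]
    rw [g0, g1]
    simp

lemma length_pvG (i : Nat) : (pvG i).length = 8 := by
  unfold pvG; split <;> rfl

lemma length_pvAlt (m : Nat) : (pvAlt m).length = 8 * m := by
  induction m with
  | zero => rfl
  | succ m ih =>
    simp only [pvAlt, List.range_succ, List.flatMap_append, List.flatMap_cons, List.flatMap_nil,
      List.length_append] at *
    simp [ih, length_pvG]
    ring

lemma take_pvAlt {m M : Nat} (h : m ≤ M) : (pvAlt M).take (m * 8) = pvAlt m := by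
  have hM : M = m + (M - m) := by omega
  rw [hM]
  simp only [pvAlt, List.range_add, List.flatMap_append]
  have hl : ((List.range m).flatMap pvG).length = m * 8 := by
    have := length_pvAlt m; simp only [pvAlt] at this; omega
  rw [← hl, List.take_left]

-- A's third loop produces exactly pvAlt of the byte count

lemma pyGetD_patterns (k : Nat) :
    PySem.List.pyGetD [pvP0, pvP1] (PySem.Int.mod (k : Int) 2) [] = pvG k := by
  have hm : PySem.Int.mod (k : Int) 2 = ((k % 2 : Nat) : Int) := by
    rw [PySem.Int.mod_eq_emod_of_pos (by norm_num)]
    omega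
  rw [hm, PySem.List.pyGetD_natCast]
  rcases Nat.mod_two_eq_zero_or_one k with h | h <;> simp [pvG, h]

-- A's third loop produces exactly pvAlt of the byte count
lemma alt_foldl (b : Int) (s : List Char) :
    (PySem.List.pyRange 0 b 1).foldl
      (fun s i => s ++ PySem.List.pyGetD [pvP0, pvP1] (PySem.Int.mod i 2) []) s
      = s ++ pvAlt b.toNat := by
  rw [PySem.List.foldl_append_eq_flatMap, pyRange_zero_toNat]
  congr 1
  induction b.toNat with
  | zero => rfl
  | succ m ih =>
    rw [List.range_succ, List.map_append, List.flatMap_append, ih]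
    simp only [pvAlt, List.range_succ, List.flatMap_append, List.map_cons, List.map_nil,
      List.flatMap_cons, List.flatMap_nil, pyGetD_patterns]

lemma length_pyRange_zero (m : Int) : (PySem.List.pyRange 0 m 1).length = m.toNat := by
  rw [pyRange_zero_toNat]; simp

-- ===== VERDICT (by name: the statement is the Claim_ definition above) =====
theorem add_terminator_and_pad_spec : Claim_equal_add_terminator_and_pad := by
  unfold Claim_equal_add_terminator_and_pad
  intro e tb _
  unfold Spec_add_terminator_and_pad
  -- shared abbreviations
  set n := e.toList.length with hn
  set t1 := (min 4 (tb - (n : Int))).toNat with ht1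
  set p := (8 - (n + t1) % 8) % 8 with hp
  set b := PySem.Int.floordiv (tb - ((n : Int) + t1 + p)) 8 with hb
  -- A's value
  have hA : add_terminator_and_pad e tb
      = String.ofList (e.toList ++ List.replicate (t1 + p) '0' ++ pvAlt b.toNat) := by
    unfold add_terminator_and_pad
    simp only [PySem.Str.len_eq, ← hn]
    rw [zeros_foldl, length_pyRange_zero, ← ht1]
    rw [padTo8_eq p _ (by simp only [List.length_append, List.length_replicate]; omega)]
    rw [List.append_assoc, ← List.replicate_add]
    have hlen : ((e.toList ++ List.replicate (t1 + p) '0').length : Int) = (n : Int) + t1 + p := by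
      simp only [List.length_append, List.length_replicate, ← hn]; push_cast; ring
    rw [hlen, ← hb]
    rw [show ([['1','1','1','0','1','1','0','0'], ['0','0','0','1','0','0','0','1']] : List (List Char))
          = [pvP0, pvP1] from rfl]
    rw [alt_foldl]
  -- B's value
  have hB : add_terminator_and_pad_alt e tb
      = String.ofList (e.toList ++ List.replicate (t1 + p) '0' ++ pvAlt b.toNat) := by
    unfold add_terminator_and_pad_alt
    simp only [PySem.Str.len_eq, ← hn]
    have hterm : max 0 (min 4 (tb - (n : Int))) = (t1 : Int) := by rw [ht1]; omega
    have halign : PySem.Int.mod (8 - PySem.Int.mod ((n : Int) + t1) 8) 8 = (p : Int) := by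
      rw [PySem.Int.mod_eq_emod_of_pos (by norm_num), PySem.Int.mod_eq_emod_of_pos (by norm_num), hp]
      omega
    rw [hterm, halign]
    have hbtf : max 0 b = (b.toNat : Int) := by omega
    rw [hbtf]
    have hq : (PySem.Int.floordiv ((b.toNat : Int) + 1) 2).toNat = (b.toNat + 1) / 2 := by
      rw [PySem.Int.floordiv_eq_ediv_of_pos (by norm_num)]; omega
    have htk : (((b.toNat : Int)) * 8).toNat = b.toNat * 8 := by omega
    rw [hq, htk]
    rw [show (['1','1','1','0','1','1','0','0','0','0','0','1','0','0','0','1'] : List Char)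
          = pvP0 ++ pvP1 from rfl]
    rw [flatten_replicate_alt, take_pvAlt (by omega)]
    have hta : ((t1 : Int) + (p : Int)).toNat = t1 + p := by omega
    rw [hta]
  rw [hA, hB]
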